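-- pv_equiv track=rewrite | github.com/engineerjkk/CodingTest | 백준/Silver/17086. 아기 상어 2/아기 상어 2.py | find_max_safe_distance
-- ===== SOURCE A (Python) =====
-- from collections import deque
--
-- def find_max_safe_distance(grid, n, m):
--     # 8방향 이동 (상하좌우 + 대각선)
--     dx = [-1, -1, -1, 0, 0, 1, 1, 1]
--     dy = [-1, 0, 1, -1, 1, -1, 0, 1]
--
--     # 상어 위치 찾기
--     sharks = []
--     for i in range(n):
--         for j in range(m):
--             if grid[i][j] == 1:
--                 sharks.append((i, j))
--
--     # BFS로 각 빈 칸의 안전 거리 계산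
--     def bfs():
--         distances = [[-1] * m for _ in range(n)]
--         queue = deque()
--
--         # 상어 위치를 시작점으로 설정
--         for shark in sharks:
--             x, y = shark
--             distances[x][y] = 0
--             queue.append((x, y))
--
--         while queue:
--             x, y = queue.popleft()
--
--             # 8방향 탐색
--             for i in range(8):
--                 nx = x + dx[i]
--                 ny = y + dy[i]
--
--                 # 범위 체크 및 미방문 체크
--                 if 0 <= nx < n and 0 <= ny < m and distances[nx][ny] == -1:
--                     distances[nx][ny] = distances[x][y] + 1
--                     queue.append((nx, ny))
--
--         return distances
--
--     # 모든 칸의 안전 거리 계산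
--     distances = bfs()
--
--     # 안전 거리의 최댓값 찾기
--     max_distance = 0
--     for i in range(n):
--         for j in range(m):
--             if grid[i][j] == 0:  # 빈 칸인 경우만 고려
--                 max_distance = max(max_distance, distances[i][j])
--
--     return max_distance
-- ===== SOURCE B (Python) =====
-- def find_max_safe_distance(grid, n, m):
--     # With 8-directional moves and no obstacles, the BFS distance to the nearest
--     # shark equals the Chebyshev distance max(|di|,|dj|) to the nearest shark,
--     # so compute that closed form directly instead of running a BFS.
--     sharks = [(i, j) for i in range(n) for j in range(m) if grid[i][j] == 1]
--     if not sharks: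
--         return 0
--     best = 0
--     for i in range(n):
--         for j in range(m):
--             if grid[i][j] == 0:
--                 d = min(max(abs(i - x), abs(j - y)) for (x, y) in sharks)
--                 if d > best:
--                     best = d
--     return best
-- ===== Notes on version B (the rewrite author's own statement) =====
-- stated objective: simpler
-- what changed: Replaced the multi-source 8-directional BFS (queue + distance matrix) by the closed form it computes: with 8-way moves and no walls the BFS distance of a cell to the nearest shark is exactly the Chebyshev distance max(|di|,|dj|) minimised over sharks, so B just scans the empty cells and takes that minimum directly (0 if there are no sharks).
import Mathlib
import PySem

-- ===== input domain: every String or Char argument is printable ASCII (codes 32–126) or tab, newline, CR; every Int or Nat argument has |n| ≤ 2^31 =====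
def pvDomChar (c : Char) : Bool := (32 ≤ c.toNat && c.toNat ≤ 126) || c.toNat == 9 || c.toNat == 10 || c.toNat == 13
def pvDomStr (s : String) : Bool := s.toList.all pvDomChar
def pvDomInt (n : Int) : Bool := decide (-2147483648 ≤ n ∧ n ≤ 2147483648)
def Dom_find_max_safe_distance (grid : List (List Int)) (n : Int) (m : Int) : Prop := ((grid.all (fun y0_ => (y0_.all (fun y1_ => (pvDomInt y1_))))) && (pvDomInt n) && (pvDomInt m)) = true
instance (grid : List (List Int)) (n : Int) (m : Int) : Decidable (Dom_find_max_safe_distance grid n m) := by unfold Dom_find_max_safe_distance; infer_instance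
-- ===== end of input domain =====

-- B replaces A's multi-source 8-directional BFS by the closed form it computes
-- (minimum Chebyshev distance to a shark); objective: simpler, not faster.

-- ===== PORT A =====
-- grid[i][j] for the bounds-checked non-negative indices both programs use
def pvGridAt (grid : List (List Int)) (i j : Int) : Int :=
  PySem.List.pyGetD (PySem.List.pyGetD grid i []) j 0

-- distances[i][j] read / distances[i][j] = v; exact for the bounds-checked
-- non-negative indices A uses
def pvMget (d : List (List Int)) (i j : Int) : Int := (d.getD i.toNat []).getD j.toNat (-1)
def pvMset (d : List (List Int)) (i j : Int) (v : Int) : List (List Int) :=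
  d.set i.toNat ((d.getD i.toNat []).set j.toNat v)

-- the `while queue:` loop of bfs(); fuel bounds the number of pops (each pop
-- either empties the queue or marks cells; the proof shows the given fuel is
-- never exhausted before the queue empties)
def pvBfsLoop (n m : Int) (dx dy : List Int) : Nat → List (Int × Int) → List (List Int) → List (List Int)
  | _, [], d => d
  | 0, _ :: _, d => d
  | fuel + 1, (x, y) :: rest, d =>
      let st := (List.zip dx dy).foldl
        (fun (st : List (Int × Int) × List (List Int)) dd =>
          let nx := x + dd.1
          let ny := y + dd.2
          if 0 ≤ nx ∧ nx < n ∧ 0 ≤ ny ∧ ny < m ∧ pvMget st.2 nx ny = -1 then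
            (st.1 ++ [(nx, ny)], pvMset st.2 nx ny (pvMget st.2 x y + 1))
          else st) (rest, d)
      pvBfsLoop n m dx dy fuel st.1 st.2

def find_max_safe_distance (grid : List (List Int)) (n : Int) (m : Int) : Int :=
  let dx : List Int := [-1, -1, -1, 0, 0, 1, 1, 1]
  let dy : List Int := [-1, 0, 1, -1, 1, -1, 0, 1]
  let sharks : List (Int × Int) := (PySem.List.pyRange 0 n 1).foldl (fun acc i =>
    (PySem.List.pyRange 0 m 1).foldl (fun acc j =>
      if pvGridAt grid i j = 1 then acc ++ [(i, j)] else acc) acc) []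
  let d0 : List (List Int) := (PySem.List.pyRange 0 n 1).map (fun _ => List.replicate m.toNat (-1))
  let init : List (List Int) × List (Int × Int) := sharks.foldl
    (fun st s => (pvMset st.1 s.1 s.2 0, st.2 ++ [s])) (d0, [])
  let distances := pvBfsLoop n m dx dy (2 * (n.toNat * m.toNat) + init.2.length + 1) init.2 init.1
  (PySem.List.pyRange 0 n 1).foldl (fun acc i =>
    (PySem.List.pyRange 0 m 1).foldl (fun acc j =>
      if pvGridAt grid i j = 0 then max acc (pvMget distances i j) else acc) acc) 0

-- ===== PORT B =====
def find_max_safe_distance_alt (grid : List (List Int)) (n : Int) (m : Int) : Int :=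
  let sharks : List (Int × Int) := (PySem.List.pyRange 0 n 1).flatMap (fun i =>
    ((PySem.List.pyRange 0 m 1).filter (fun j => pvGridAt grid i j == 1)).map (fun j => (i, j)))
  match sharks with
  | [] => 0
  | s0 :: ss =>
    (PySem.List.pyRange 0 n 1).foldl (fun best i =>
      (PySem.List.pyRange 0 m 1).foldl (fun best j =>
        if pvGridAt grid i j = 0 then
          let dcell := ss.foldl (fun a s => min a (max |i - s.1| |j - s.2|))
            (max |i - s0.1| |j - s0.2|)
          if best < dcell then dcell else best
        else best) best) 0

-- ===== PRECONDITION & SPEC =====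
-- Pre_ excludes exactly the inputs on which A raises IndexError: a positive
-- n×m box that the grid does not cover (fewer than n rows, or a row among the
-- first n shorter than m).
def Pre_find_max_safe_distance (grid : List (List Int)) (n : Int) (m : Int) : Prop :=
  n ≤ 0 ∨ m ≤ 0 ∨ (n ≤ (grid.length : Int) ∧ ∀ row ∈ grid.take n.toNat, m ≤ (row.length : Int))
instance (grid : List (List Int)) (n : Int) (m : Int) : Decidable (Pre_find_max_safe_distance grid n m) := by
  unfold Pre_find_max_safe_distance; infer_instance
def pvWitness_find_max_safe_distance : List (List Int) × Int × Int := ([[1, 0], [0, 0]], 2, 2)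

def Spec_find_max_safe_distance (grid : List (List Int)) (n : Int) (m : Int) (out : Int) : Prop := out = find_max_safe_distance_alt grid n m
instance (grid : List (List Int)) (n : Int) (m : Int) (out : Int) : Decidable (Spec_find_max_safe_distance grid n m out) := by unfold Spec_find_max_safe_distance; infer_instance

-- ===== CLAIM (what is proved, stated in full; the proofs are below) =====
def Claim_equal_find_max_safe_distance : Prop := ∀ (grid : List (List Int)) (n : Int) (m : Int), Dom_find_max_safe_distance grid n m → Pre_find_max_safe_distance grid n m → Spec_find_max_safe_distance grid n m (find_max_safe_distance grid n m)

-- ===== LEMMAS AND PROOFS =====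

-- The eight direction offsets of A, as pairs
def pvDirs : List (Int × Int) := [(-1, -1), (-1, 0), (-1, 1), (0, -1), (0, 1), (1, -1), (1, 0), (1, 1)]

def pvInBox (n m i j : Int) : Prop := 0 ≤ i ∧ i < n ∧ 0 ≤ j ∧ j < m

def pvShape (n m : Int) (d : List (List Int)) : Prop :=
  d.length = n.toNat ∧ ∀ r ∈ d, r.length = m.toNat

-- Chebyshev distance of (i,j) to shark t, and its minimum over a shark list
def pvCheb (i j : Int) (t : Int × Int) : Int := max |i - t.1| |j - t.2|

def pvDmin (S : List (Int × Int)) (i j : Int) : Int :=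
  match S with
  | [] => 0
  | t :: r => r.foldl (fun a s => min a (pvCheb i j s)) (pvCheb i j t)

-- number of still-unmarked entries of the distance matrix (the loop variant)
def pvCnt (d : List (List Int)) : Nat := (d.map (fun r => r.countP (fun z => z == -1))).sum

-- the BFS queue invariant: the queue is a block qa of cells at distance k
-- followed by a block qb at distance k+1
def pvInv (n m : Int) (S : List (Int × Int)) (k : Int) (qa qb : List (Int × Int)) (d : List (List Int)) : Prop :=
  pvShape n m d ∧ 0 ≤ k ∧
  (∀ c ∈ qa, pvInBox n m c.1 c.2 ∧ pvDmin S c.1 c.2 = k) ∧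
  (∀ c ∈ qb, pvInBox n m c.1 c.2 ∧ pvDmin S c.1 c.2 = k + 1) ∧
  (qa ++ qb).Nodup ∧
  (∀ c ∈ qa ++ qb, pvInBox n m c.1 c.2 ∧ pvMget d c.1 c.2 ≠ -1) ∧
  (∀ i j, pvInBox n m i j → pvMget d i j ≠ -1 → pvMget d i j = pvDmin S i j) ∧
  (∀ i j, pvInBox n m i j → pvDmin S i j ≤ k → pvMget d i j ≠ -1) ∧
  (∀ i j, pvInBox n m i j → pvMget d i j ≠ -1 → (i, j) ∉ qa ++ qb →
    ∀ dd ∈ pvDirs, pvInBox n m (i + dd.1) (j + dd.2) → pvMget d (i + dd.1) (j + dd.2) ≠ -1)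

-- one pop of the queue, as a fold over the direction pairs
def pvStepFn (n m x y : Int) (st : List (Int × Int) × List (List Int)) (dd : Int × Int) :
    List (Int × Int) × List (List Int) :=
  let nx := x + dd.1
  let ny := y + dd.2
  if 0 ≤ nx ∧ nx < n ∧ 0 ≤ ny ∧ ny < m ∧ pvMget st.2 nx ny = -1 then
    (st.1 ++ [(nx, ny)], pvMset st.2 nx ny (pvMget st.2 x y + 1))
  else st

-- ---- matrix lemmas ----
lemma pvGetD_all (xs : List Int) (j : Nat) (dflt : Int) (h : ∀ z ∈ xs, z = dflt) :
    xs.getD j dflt = dflt := by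
  rw [List.getD_eq_getElem?_getD]
  rcases hx : xs[j]? with _ | z
  · rfl
  · simpa using h z (List.mem_of_getElem? hx)

lemma pvMget_rep (d : List (List Int)) (b : Nat) (i j : Int)
    (hd : ∀ r ∈ d, r = List.replicate b (-1)) : pvMget d i j = -1 := by
  unfold pvMget
  apply pvGetD_all
  intro z hz
  have h : d.getD i.toNat [] = List.replicate b (-1)
      ∨ d.getD i.toNat ([] : List Int) = [] := by
    rw [List.getD_eq_getElem?_getD]
    rcases hx : d[i.toNat]? with _ | r
    · right; rfl
    · left
      simpa using hd r (List.mem_of_getElem? hx)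
  rcases h with h | h <;> rw [h] at hz
  · exact List.eq_of_mem_replicate hz
  · cases hz

lemma pvGetD_set_self {α : Type} (l : List α) (a : Nat) (v : α) (dflt : α) (h : a < l.length) :
    (l.set a v).getD a dflt = v := by
  rw [List.getD_eq_getElem?_getD, List.getElem?_set_self (by simpa using h)]; rfl

lemma pvGetD_set_ne {α : Type} (l : List α) (a b : Nat) (v : α) (dflt : α) (h : b ≠ a) :
    (l.set a v).getD b dflt = l.getD b dflt := by
  rw [List.getD_eq_getElem?_getD, List.getElem?_set_ne (by omega), ← List.getD_eq_getElem?_getD]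

lemma pvGetD_eq_getElem {α : Type} (l : List α) (a : Nat) (dflt : α) (h : a < l.length) :
    l.getD a dflt = l[a] := by
  rw [List.getD_eq_getElem?_getD, List.getElem?_eq_getElem h]; rfl

lemma pvSum_set (l : List Nat) (i : Nat) (a : Nat) (h : i < l.length) :
    (l.set i a).sum + l[i] = l.sum + a := by
  induction l generalizing i with
  | nil => simp at h
  | cons x l ih =>
    cases i with
    | zero => simp [List.set]; omega
    | succ i =>
      simp only [List.set, List.sum_cons, List.getElem_cons_succ]
      have := ih i (by simpa using h)
      omega

lemma pvCountP_set (r : List Int) (j : Nat) (v : Int) (h : j < r.length) :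
    (r.set j v).countP (fun z => z == -1) + (if r[j] = -1 then 1 else 0)
      = r.countP (fun z => z == -1) + (if v = -1 then 1 else 0) := by
  induction r generalizing j with
  | nil => simp at h
  | cons x r ih =>
    cases j with
    | zero => simp [List.set, List.countP_cons]; split_ifs <;> simp_all
    | succ j =>
      simp only [List.set, List.countP_cons, List.getElem_cons_succ]
      have := ih j (by simpa using h)
      split_ifs at * <;> omega

lemma pvShape_mset (n m : Int) (d : List (List Int)) (i j v : Int)
    (h : pvShape n m d) : pvShape n m (pvMset d i j v) := by
  obtain ⟨h1, h2⟩ := h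
  rcases lt_or_ge i.toNat d.length with hlt | hge
  · refine ⟨by simp [pvMset, h1], ?_⟩
    intro r hr
    rcases List.mem_or_eq_of_mem_set hr with hr | rfl
    · exact h2 r hr
    · rw [List.length_set, pvGetD_eq_getElem d _ _ hlt]
      exact h2 _ (List.getElem_mem hlt)
  · unfold pvMset
    rw [List.set_eq_of_length_le (by omega)]
    exact ⟨h1, h2⟩

lemma pvMget_mset_self (n m : Int) (d : List (List Int)) (i j v : Int)
    (hs : pvShape n m d) (hb : pvInBox n m i j) : pvMget (pvMset d i j v) i j = v := by
  obtain ⟨h1, h2⟩ := hs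
  obtain ⟨hi1, hi2, hj1, hj2⟩ := hb
  have hiN : i.toNat < d.length := by omega
  have hjN : j.toNat < (d.getD i.toNat []).length := by
    rw [pvGetD_eq_getElem d _ _ hiN, h2 _ (List.getElem_mem hiN)]; omega
  unfold pvMget pvMset
  rw [pvGetD_set_self d _ _ _ hiN, pvGetD_set_self _ _ _ _ hjN]

lemma pvMget_mset_ne (d : List (List Int)) (i j i' j' v : Int)
    (hi : 0 ≤ i) (hj : 0 ≤ j) (hi' : 0 ≤ i') (hj' : 0 ≤ j')
    (hne : (i', j') ≠ (i, j)) : pvMget (pvMset d i j v) i' j' = pvMget d i' j' := by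
  unfold pvMget pvMset
  rcases eq_or_ne i'.toNat i.toNat with hii | hii
  · have hjj : j'.toNat ≠ j.toNat := by
      have : ¬(i' = i ∧ j' = j) := by simpa [Prod.ext_iff] using hne
      omega
    rcases lt_or_ge i.toNat d.length with hlt | hge
    · rw [hii, pvGetD_set_self d _ _ _ hlt, pvGetD_set_ne _ _ _ _ _ hjj]
    · rw [List.set_eq_of_length_le (by omega)]
  · rw [pvGetD_set_ne _ _ _ _ _ hii]

lemma pvCnt_mset (n m : Int) (d : List (List Int)) (i j v : Int)
    (hs : pvShape n m d) (hb : pvInBox n m i j)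
    (hu : pvMget d i j = -1) (hv : v ≠ -1) : pvCnt (pvMset d i j v) + 1 = pvCnt d := by
  obtain ⟨h1, h2⟩ := hs
  obtain ⟨hi1, hi2, hj1, hj2⟩ := hb
  have hiN : i.toNat < d.length := by omega
  have hjN : j.toNat < (d[i.toNat]).length := by
    rw [h2 _ (List.getElem_mem hiN)]; omega
  have hentry : (d[i.toNat])[j.toNat] = -1 := by
    unfold pvMget at hu
    rw [pvGetD_eq_getElem d _ _ hiN, pvGetD_eq_getElem _ _ _ hjN] at hu
    exact hu
  unfold pvCnt pvMset
  rw [pvGetD_eq_getElem d _ _ hiN, List.map_set]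
  have hmlen : i.toNat < (d.map (fun r => r.countP (fun z => z == -1))).length := by simpa using hiN
  have hsum := pvSum_set (d.map (fun r => r.countP (fun z => z == -1))) i.toNat
      ((d[i.toNat].set j.toNat v).countP (fun z => z == -1)) hmlen
  have hcnt := pvCountP_set (d[i.toNat]) j.toNat v hjN
  rw [hentry] at hcnt
  simp only [List.getElem_map] at hsum
  split_ifs at hcnt <;> omega

lemma pvCnt_le (n m : Int) (d : List (List Int)) (hs : pvShape n m d) :
    pvCnt d ≤ n.toNat * m.toNat := by
  obtain ⟨h1, h2⟩ := hs
  unfold pvCnt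
  rw [← h1]
  clear h1
  induction d with
  | nil => simp
  | cons r d ih =>
    simp only [List.map_cons, List.sum_cons, List.length_cons]
    have hr : r.countP (fun z => z == -1) ≤ m.toNat :=
      le_trans List.countP_le_length (le_of_eq (h2 r List.mem_cons_self))
    have hd := ih (fun r hr => h2 r (List.mem_cons_of_mem _ hr))
    calc r.countP (fun z => z == -1) + (d.map (fun r => r.countP (fun z => z == -1))).sum
        ≤ m.toNat + d.length * m.toNat := Nat.add_le_add hr hd
      _ = (d.length + 1) * m.toNat := by ring

-- ---- Chebyshev / pvDmin lemmas ----
lemma pvCheb_nonneg (i j : Int) (t : Int × Int) : 0 ≤ pvCheb i j t :=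
  le_max_of_le_left (abs_nonneg _)

lemma pvCheb_step (i j a b : Int) (t : Int × Int) (ha : |a| ≤ 1) (hb : |b| ≤ 1) :
    pvCheb (i + a) (j + b) t ≤ pvCheb i j t + 1 := by
  simp only [pvCheb, Int.abs_eq_natAbs, max_def] at *
  split_ifs at * <;> omega

lemma pvDirs_abs (dd : Int × Int) (h : dd ∈ pvDirs) :
    |dd.1| ≤ 1 ∧ |dd.2| ≤ 1 ∧ ¬(dd.1 = 0 ∧ dd.2 = 0) := by
  fin_cases h <;> simp

lemma pvDirs_neg (dd : Int × Int) (h : dd ∈ pvDirs) : (-dd.1, -dd.2) ∈ pvDirs := by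
  fin_cases h <;> simp [pvDirs]

lemma pvFoldMin_le_init (r : List (Int × Int)) (f : Int × Int → Int) (a : Int) :
    r.foldl (fun x s => min x (f s)) a ≤ a := by
  induction r generalizing a with
  | nil => simp
  | cons t r ih => exact le_trans (ih _) (min_le_left _ _)

lemma pvFoldMin_le_mem (r : List (Int × Int)) (f : Int × Int → Int) (a : Int)
    (t : Int × Int) (ht : t ∈ r) : r.foldl (fun x s => min x (f s)) a ≤ f t := by
  induction r generalizing a with
  | nil => cases ht
  | cons u r ih =>
    rcases List.mem_cons.mp ht with rfl | ht
    · exact le_trans (pvFoldMin_le_init r f (min a (f t))) (min_le_right _ _)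
    · exact ih (min a (f u)) ht

lemma pvFoldMin_cases (r : List (Int × Int)) (f : Int × Int → Int) (a : Int) :
    r.foldl (fun x s => min x (f s)) a = a ∨ ∃ t ∈ r, r.foldl (fun x s => min x (f s)) a = f t := by
  induction r generalizing a with
  | nil => left; rfl
  | cons u r ih =>
    rcases ih (min a (f u)) with h | ⟨t, ht, h⟩
    · rcases min_cases a (f u) with ⟨h', _⟩ | ⟨h', _⟩
      · left; simpa [h'] using h
      · right; exact ⟨u, List.mem_cons_self .., by simpa [h'] using h⟩
    · right; exact ⟨t, List.mem_cons_of_mem _ ht, h⟩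

lemma pvDmin_le (S : List (Int × Int)) (i j : Int) (t : Int × Int) (ht : t ∈ S) :
    pvDmin S i j ≤ pvCheb i j t := by
  match S with
  | [] => cases ht
  | u :: r =>
    rcases List.mem_cons.mp ht with rfl | ht
    · exact pvFoldMin_le_init _ _ _
    · exact pvFoldMin_le_mem _ _ _ _ ht

lemma pvDmin_attained (S : List (Int × Int)) (i j : Int) (hS : S ≠ []) :
    ∃ t ∈ S, pvDmin S i j = pvCheb i j t := by
  match S with
  | [] => exact absurd rfl hS
  | u :: r =>
    rcases pvFoldMin_cases r (pvCheb i j) (pvCheb i j u) with h | ⟨t, ht, h⟩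
    · exact ⟨u, List.mem_cons_self .., h⟩
    · exact ⟨t, List.mem_cons_of_mem _ ht, h⟩

lemma pvDmin_nonneg (S : List (Int × Int)) (i j : Int) (hS : S ≠ []) :
    0 ≤ pvDmin S i j := by
  obtain ⟨t, _, h⟩ := pvDmin_attained S i j hS
  rw [h]; exact pvCheb_nonneg i j t

lemma pvDmin_lipschitz (S : List (Int × Int)) (i j : Int) (dd : Int × Int)
    (hS : S ≠ []) (hdd : dd ∈ pvDirs) :
    pvDmin S (i + dd.1) (j + dd.2) ≤ pvDmin S i j + 1 := by
  obtain ⟨t, htS, h⟩ := pvDmin_attained S i j hS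
  obtain ⟨h1, h2, _⟩ := pvDirs_abs dd hdd
  calc pvDmin S (i + dd.1) (j + dd.2) ≤ pvCheb (i + dd.1) (j + dd.2) t := pvDmin_le _ _ _ _ htS
    _ ≤ pvCheb i j t + 1 := pvCheb_step i j dd.1 dd.2 t h1 h2
    _ = pvDmin S i j + 1 := by rw [h]

lemma pvDmin_step_down (n m : Int) (S : List (Int × Int)) (i j kk : Int)
    (hS : S ≠ []) (hbox : ∀ t ∈ S, pvInBox n m t.1 t.2)
    (hij : pvInBox n m i j) (hk : 0 ≤ kk) (h : pvDmin S i j = kk + 1) :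
    ∃ dd ∈ pvDirs, pvInBox n m (i + dd.1) (j + dd.2) ∧ pvDmin S (i + dd.1) (j + dd.2) = kk := by
  obtain ⟨t, htS, hD⟩ := pvDmin_attained S i j hS
  obtain ⟨hi1, hi2, hj1, hj2⟩ := hij
  obtain ⟨htx1, htx2, hty1, hty2⟩ := hbox t htS
  set a : Int := if i < t.1 then 1 else if t.1 < i then -1 else 0 with ha
  set b : Int := if j < t.2 then 1 else if t.2 < j then -1 else 0 with hb
  have hcheb : pvCheb i j t = kk + 1 := by rw [← hD, h]
  have hne : ¬(i = t.1 ∧ j = t.2) := by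
    rintro ⟨rfl, rfl⟩
    simp [pvCheb] at hcheb; omega
  have hmem : (a, b) ∈ pvDirs := by
    rw [ha, hb]; split_ifs <;> first
      | (simp [pvDirs]; done)
      | (exfalso; exact hne ⟨by omega, by omega⟩)
  have hstep : pvCheb (i + a) (j + b) t = kk := by
    rw [ha, hb]
    simp only [pvCheb, Int.abs_eq_natAbs, max_def] at hcheb ⊢
    split_ifs at hcheb ⊢ <;> omega
  refine ⟨(a, b), hmem, ?_, ?_⟩
  · show pvInBox n m (i + a) (j + b)
    refine ⟨?_, ?_, ?_, ?_⟩
    · rw [ha]; split_ifs <;> omega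
    · rw [ha]; split_ifs <;> omega
    · rw [hb]; split_ifs <;> omega
    · rw [hb]; split_ifs <;> omega
  · show pvDmin S (i + a) (j + b) = kk
    have hle : pvDmin S (i + a) (j + b) ≤ kk := by
      calc pvDmin S (i + a) (j + b) ≤ pvCheb (i + a) (j + b) t := pvDmin_le _ _ _ _ htS
        _ = kk := hstep
    have hge := pvDmin_lipschitz S (i + a) (j + b) (-a, -b) hS (pvDirs_neg (a, b) hmem)
    rw [show (i + a) + (-a, -b).1 = i by simp, show (j + b) + (-a, -b).2 = j by simp] at hge
    omega

lemma pvCheb_zero_iff (i j : Int) (t : Int × Int) : pvCheb i j t = 0 ↔ (i = t.1 ∧ j = t.2) := by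
  constructor
  · intro h
    have h1 : |i - t.1| ≤ 0 := h ▸ le_max_left _ _
    have h2 : |j - t.2| ≤ 0 := h ▸ le_max_right _ _
    rw [abs_nonpos_iff] at h1 h2
    omega
  · intro ⟨h1, h2⟩
    simp [pvCheb, h1, h2]

lemma pvDmin_zero_of_mem (S : List (Int × Int)) (i j : Int) (h : (i, j) ∈ S) :
    pvDmin S i j = 0 := by
  refine le_antisymm ?_ (pvDmin_nonneg S i j (List.ne_nil_of_mem h))
  have := pvDmin_le S i j (i, j) h
  simpa [pvCheb] using this

lemma pvDmin_mem_of_zero (S : List (Int × Int)) (i j : Int) (hS : S ≠ [])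
    (h : pvDmin S i j = 0) : (i, j) ∈ S := by
  obtain ⟨t, htS, heq⟩ := pvDmin_attained S i j hS
  have : pvCheb i j t = 0 := by omega
  obtain ⟨h1, h2⟩ := (pvCheb_zero_iff i j t).mp this
  have : (i, j) = t := by rw [h1, h2]
  rwa [this]

-- ---- the fold over the 8 directions ----
lemma pvFold_spec (n m x y : Int) (L : List (Int × Int)) (q0 : List (Int × Int))
    (d0 : List (List Int)) (hL : ∀ dd ∈ L, dd ∈ pvDirs)
    (hs : pvShape n m d0) (hxy : pvInBox n m x y) (hv : 0 ≤ pvMget d0 x y) :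
    ∃ new : List (Int × Int),
      (L.foldl (pvStepFn n m x y) (q0, d0)).1 = q0 ++ new ∧
      pvShape n m (L.foldl (pvStepFn n m x y) (q0, d0)).2 ∧
      (∀ i j, pvInBox n m i j →
        pvMget (L.foldl (pvStepFn n m x y) (q0, d0)).2 i j =
          if (i, j) ∈ new then pvMget d0 x y + 1 else pvMget d0 i j) ∧
      (∀ c ∈ new, pvInBox n m c.1 c.2 ∧ pvMget d0 c.1 c.2 = -1 ∧
        ∃ dd ∈ L, c = (x + dd.1, y + dd.2)) ∧
      new.Nodup ∧
      (∀ dd ∈ L, pvInBox n m (x + dd.1) (y + dd.2) →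
        pvMget (L.foldl (pvStepFn n m x y) (q0, d0)).2 (x + dd.1) (y + dd.2) ≠ -1) ∧
      pvCnt (L.foldl (pvStepFn n m x y) (q0, d0)).2 + new.length = pvCnt d0 := by
  induction L generalizing q0 d0 with
  | nil =>
    exact ⟨[], by simp, hs, fun i j _ => by simp, by simp, List.nodup_nil, by simp, by simp⟩
  | cons dd L ih =>
    have hdd := hL dd List.mem_cons_self
    have hL' : ∀ e ∈ L, e ∈ pvDirs := fun e he => hL e (List.mem_cons_of_mem _ he)
    set nx := x + dd.1 with hnx
    set ny := y + dd.2 with hny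
    simp only [List.foldl_cons]
    by_cases hc : 0 ≤ nx ∧ nx < n ∧ 0 ≤ ny ∧ ny < m ∧ pvMget d0 nx ny = -1
    · -- the step marks (nx, ny)
      have hnbox : pvInBox n m nx ny := ⟨hc.1, hc.2.1, hc.2.2.1, hc.2.2.2.1⟩
      have hunm : pvMget d0 nx ny = -1 := hc.2.2.2.2
      have hstep : pvStepFn n m x y (q0, d0) dd
          = (q0 ++ [(nx, ny)], pvMset d0 nx ny (pvMget d0 x y + 1)) := by
        unfold pvStepFn; rw [if_pos hc]
      rw [hstep]
      set d1 := pvMset d0 nx ny (pvMget d0 x y + 1) with hd1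
      have hs1 : pvShape n m d1 := pvShape_mset n m d0 nx ny _ hs
      have hxyne : (x, y) ≠ (nx, ny) := by
        obtain ⟨-, -, hz⟩ := pvDirs_abs dd hdd
        intro h
        have h1 : x = nx := congrArg Prod.fst h
        have h2 : y = ny := congrArg Prod.snd h
        exact hz ⟨by omega, by omega⟩
      have hvxy : pvMget d1 x y = pvMget d0 x y := by
        rw [hd1]
        exact pvMget_mset_ne d0 nx ny x y _ hc.1 hc.2.2.1 hxy.1 hxy.2.2.1 hxyne
      have hnewmark : pvMget d1 nx ny = pvMget d0 x y + 1 :=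
        pvMget_mset_self n m d0 nx ny _ hs hnbox
      obtain ⟨new, h1, h2, h3, h4, h5, h6, h7⟩ :=
        ih (q0 ++ [(nx, ny)]) d1 hL' hs1 (by rw [hvxy]; exact hv)
      have hnn : (nx, ny) ∉ new := by
        intro hmem
        have := (h4 _ hmem).2.1
        rw [hnewmark] at this
        omega
      refine ⟨(nx, ny) :: new, ?_, h2, ?_, ?_, ?_, ?_, ?_⟩
      · rw [h1]; simp
      · intro i j hij
        rw [h3 i j hij, hvxy]
        by_cases hm : (i, j) = (nx, ny)
        · have hi' : i = nx := congrArg Prod.fst hm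
          have hj' : j = ny := congrArg Prod.snd hm
          subst hi' hj'
          rw [if_neg hnn, hnewmark, if_pos List.mem_cons_self]
        · rw [pvMget_mset_ne d0 nx ny i j _ hc.1 hc.2.2.1 hij.1 hij.2.2.1 hm]
          by_cases h2m : (i, j) ∈ new
          · rw [if_pos h2m, if_pos (List.mem_cons_of_mem _ h2m)]
          · rw [if_neg h2m, if_neg (by simp [hm, h2m])]
      · intro c hcm
        rcases List.mem_cons.mp hcm with rfl | hcm
        · exact ⟨hnbox, hunm, dd, List.mem_cons_self, rfl⟩
        · obtain ⟨hb1, hb2, dd', hdd', he⟩ := h4 c hcm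
          refine ⟨hb1, ?_, dd', List.mem_cons_of_mem _ hdd', he⟩
          have hne : (c.1, c.2) ≠ (nx, ny) := by
            intro hcc
            apply hnn
            have : c = (nx, ny) := by cases c; exact hcc
            rwa [this] at hcm
          rw [hd1, pvMget_mset_ne d0 nx ny c.1 c.2 _ hc.1 hc.2.2.1 hb1.1 hb1.2.2.1 hne] at hb2
          exact hb2
      · exact List.nodup_cons.mpr ⟨hnn, h5⟩
      · intro e he hbe
        rcases List.mem_cons.mp he with rfl | he
        · have := h3 nx ny hnbox
          rw [this]
          split
          · rw [hvxy]; omega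
          · rw [hnewmark]; omega
        · exact h6 e he hbe
      · have : pvCnt d1 + 1 = pvCnt d0 :=
          pvCnt_mset n m d0 nx ny _ hs hnbox hunm (by omega)
        simp only [List.length_cons]
        omega
    · -- no marking for this direction
      have hstep : pvStepFn n m x y (q0, d0) dd = (q0, d0) := by
        unfold pvStepFn; rw [if_neg hc]
      rw [hstep]
      obtain ⟨new, h1, h2, h3, h4, h5, h6, h7⟩ := ih q0 d0 hL' hs hv
      refine ⟨new, h1, h2, h3, ?_, h5, ?_, h7⟩
      · intro c hcm
        obtain ⟨hb1, hb2, dd', hdd', he⟩ := h4 c hcm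
        exact ⟨hb1, hb2, dd', List.mem_cons_of_mem _ hdd', he⟩
      · intro e he hbe
        rcases List.mem_cons.mp he with rfl | he
        · -- condition failed but target in box ⇒ it was already marked
          have hm0 : pvMget d0 nx ny ≠ -1 := by
            intro hmm
            exact hc ⟨hbe.1, hbe.2.1, hbe.2.2.1, hbe.2.2.2, hmm⟩
          have := h3 nx ny hbe
          rw [this]
          split
          · omega
          · exact hm0
        · exact h6 e he hbe

-- ---- invariant machinery ----
lemma pvInv_norm (n m : Int) (S : List (Int × Int)) (k : Int) (qb : List (Int × Int))
    (d : List (List Int)) (hS : S ≠ []) (hbox : ∀ t ∈ S, pvInBox n m t.1 t.2)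
    (hinv : pvInv n m S k [] qb d) : pvInv n m S (k + 1) qb [] d := by
  obtain ⟨hsh, hk, _, hqb, hnd, hmk, hcor, hfr, hcl⟩ := hinv
  have hfr' : ∀ i j, pvInBox n m i j → pvDmin S i j ≤ k + 1 → pvMget d i j ≠ -1 := by
    intro i j hij hle
    by_cases h : pvDmin S i j ≤ k
    · exact hfr i j hij h
    · -- pvDmin = k + 1 : step down to a marked cell not in the queue
      have hd : pvDmin S i j = k + 1 := by omega
      obtain ⟨dd, hdd, hbx, hdm⟩ := pvDmin_step_down n m S i j k hS hbox hij hk hd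
      have hwm : pvMget d (i + dd.1) (j + dd.2) ≠ -1 := hfr _ _ hbx (le_of_eq hdm)
      have hwq : (i + dd.1, j + dd.2) ∉ ([] : List (Int × Int)) ++ qb := by
        intro hq
        have := (hqb _ hq).2
        simp only at this
        omega
      have := hcl (i + dd.1) (j + dd.2) hbx hwm hwq (-dd.1, -dd.2) (pvDirs_neg dd hdd)
      rw [show i + dd.1 + (-dd.1, -dd.2).1 = i by simp, show j + dd.2 + (-dd.1, -dd.2).2 = j by simp] at this
      exact this hij
  refine ⟨hsh, by omega, hqb, by simp, by simpa using hnd, by simpa using hmk, hcor, hfr', ?_⟩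
  intro i j hij hm hq
  exact hcl i j hij hm (by simpa using hq)

lemma pvClosed_all_marked (n m : Int) (S : List (Int × Int)) (k : Int) (d : List (List Int))
    (hS : S ≠ []) (hbox : ∀ t ∈ S, pvInBox n m t.1 t.2) (hk : 0 ≤ k)
    (hfr : ∀ i j, pvInBox n m i j → pvDmin S i j ≤ k → pvMget d i j ≠ -1)
    (hcl : ∀ i j, pvInBox n m i j → pvMget d i j ≠ -1 →
      ∀ dd ∈ pvDirs, pvInBox n m (i + dd.1) (j + dd.2) → pvMget d (i + dd.1) (j + dd.2) ≠ -1) :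
    ∀ i j, pvInBox n m i j → pvMget d i j ≠ -1 := by
  have main : ∀ (t : Nat) (i j : Int), pvInBox n m i j → (pvDmin S i j).toNat ≤ t →
      pvMget d i j ≠ -1 := by
    intro t
    induction t with
    | zero =>
      intro i j hij ht
      apply hfr i j hij
      have := pvDmin_nonneg S i j hS
      omega
    | succ t ih =>
      intro i j hij ht
      by_cases hle : pvDmin S i j ≤ k
      · exact hfr i j hij hle
      · have hpos : pvDmin S i j = ((pvDmin S i j - 1) + 1) := by ring
        have hnn := pvDmin_nonneg S i j hS
        obtain ⟨dd, hdd, hbx, hdm⟩ := pvDmin_step_down n m S i j (pvDmin S i j - 1) hS hbox hij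
          (by omega) hpos
        have hmark : pvMget d (i + dd.1) (j + dd.2) ≠ -1 := by
          apply ih _ _ hbx
          omega
        have := hcl (i + dd.1) (j + dd.2) hbx hmark (-dd.1, -dd.2) (pvDirs_neg dd hdd)
        rw [show i + dd.1 + (-dd.1, -dd.2).1 = i by simp, show j + dd.2 + (-dd.1, -dd.2).2 = j by simp] at this
        exact this hij
  intro i j hij
  exact main (pvDmin S i j).toNat i j hij le_rfl

lemma pvBfsLoop_nil (n m : Int) (dx dy : List Int) (fuel : Nat) (d : List (List Int)) :
    pvBfsLoop n m dx dy fuel [] d = d := by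
  cases fuel <;> rfl

lemma pvBfsLoop_cons (n m : Int) (f : Nat) (x y : Int) (rest : List (Int × Int))
    (d : List (List Int)) :
    pvBfsLoop n m [-1, -1, -1, 0, 0, 1, 1, 1] [-1, 0, 1, -1, 1, -1, 0, 1] (f + 1) ((x, y) :: rest) d
      = pvBfsLoop n m [-1, -1, -1, 0, 0, 1, 1, 1] [-1, 0, 1, -1, 1, -1, 0, 1] f
          (pvDirs.foldl (pvStepFn n m x y) (rest, d)).1
          (pvDirs.foldl (pvStepFn n m x y) (rest, d)).2 := rfl

lemma pvBfs_pop (n m : Int) (S : List (Int × Int))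
    (hS : S ≠ []) (f : Nat)
    (ih : ∀ (k : Int) (qa qb : List (Int × Int)) (d : List (List Int)),
      pvInv n m S k qa qb d → 2 * pvCnt d + (qa ++ qb).length ≤ f →
      ∀ i j, pvInBox n m i j →
        pvMget (pvBfsLoop n m [-1, -1, -1, 0, 0, 1, 1, 1] [-1, 0, 1, -1, 1, -1, 0, 1] f (qa ++ qb) d) i j
          = pvDmin S i j)
    (k x y : Int) (ra qb : List (Int × Int)) (d : List (List Int))
    (hinv : pvInv n m S k ((x, y) :: ra) qb d)
    (hμ : 2 * pvCnt d + (((x, y) :: ra) ++ qb).length ≤ f + 1)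
    (i j : Int) (hij : pvInBox n m i j) :
    pvMget (pvBfsLoop n m [-1, -1, -1, 0, 0, 1, 1, 1] [-1, 0, 1, -1, 1, -1, 0, 1] (f + 1) (((x, y) :: ra) ++ qb) d) i j
      = pvDmin S i j := by
  obtain ⟨hsh, hk, hqa, hqb, hnd, hmk, hcor, hfr, hcl⟩ := hinv
  have hxybox : pvInBox n m x y := (hqa (x, y) List.mem_cons_self).1
  have hDxy : pvDmin S x y = k := (hqa (x, y) List.mem_cons_self).2
  have hxymk : pvMget d x y ≠ -1 := (hmk (x, y) (by simp)).2
  have hval : pvMget d x y = k := by rw [hcor x y hxybox hxymk, hDxy]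
  obtain ⟨new, h1, h2, h3, h4, h5, h6, h7⟩ :=
    pvFold_spec n m x y pvDirs (ra ++ qb) d (fun dd h => h) hsh hxybox (by omega)
  set F := pvDirs.foldl (pvStepFn n m x y) (ra ++ qb, d) with hF
  have hmono : ∀ i' j', pvInBox n m i' j' → pvMget d i' j' ≠ -1 → pvMget F.2 i' j' ≠ -1 := by
    intro i' j' hb hm
    rw [h3 i' j' hb]
    split
    · omega
    · exact hm
  have hnewD : ∀ c ∈ new, pvDmin S c.1 c.2 = k + 1 := by
    intro c hc
    obtain ⟨hcb, hcu, dd, hdd, hce⟩ := h4 c hc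
    have hup : pvDmin S c.1 c.2 ≤ k + 1 := by
      have := pvDmin_lipschitz S x y dd hS hdd
      rw [hce]; simpa [hDxy] using this
    have hlow : ¬ pvDmin S c.1 c.2 ≤ k := by
      intro hle
      exact (hfr c.1 c.2 hcb hle) hcu
    omega
  have hnewval : ∀ c ∈ new, pvMget F.2 c.1 c.2 = k + 1 := by
    intro c hc
    have hcb := (h4 c hc).1
    rw [h3 c.1 c.2 hcb, if_pos (by simpa using hc), hval]
  have hqd : ((x, y) :: (ra ++ qb)).Nodup := by simpa using hnd
  have hinv' : pvInv n m S k ra (qb ++ new) F.2 := by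
    refine ⟨h2, hk, ?_, ?_, ?_, ?_, ?_, ?_, ?_⟩
    · exact fun c hc => hqa c (List.mem_cons_of_mem _ hc)
    · intro c hc
      rcases List.mem_append.mp hc with hc | hc
      · exact hqb c hc
      · exact ⟨(h4 c hc).1, hnewD c hc⟩
    · rw [← List.append_assoc]
      refine List.Nodup.append hqd.of_cons h5 ?_
      intro c hc1 hc2
      have hm := hmk c (by rcases List.mem_append.mp hc1 with h | h <;> simp [h])
      exact hm.2 (h4 c hc2).2.1
    · intro c hc
      rcases List.mem_append.mp hc with hc | hc
      · have hm := hmk c (by simp [hc])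
        exact ⟨hm.1, hmono c.1 c.2 hm.1 hm.2⟩
      · rcases List.mem_append.mp hc with hc | hc
        · have hm := hmk c (by simp [hc])
          exact ⟨hm.1, hmono c.1 c.2 hm.1 hm.2⟩
        · refine ⟨(h4 c hc).1, ?_⟩
          rw [hnewval c hc]
          omega
    · intro i' j' hb hm
      rw [h3 i' j' hb] at hm ⊢
      by_cases hin : (i', j') ∈ new
      · rw [if_pos hin] at hm ⊢
        rw [hval]
        exact (hnewD (i', j') hin).symm
      · rw [if_neg hin] at hm ⊢
        exact hcor i' j' hb hm
    · intro i' j' hb hle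
      exact hmono i' j' hb (hfr i' j' hb hle)
    · intro i' j' hb hm hq dd hdd hbx
      by_cases hin : (i', j') ∈ new
      · exact absurd (by simp [hin] : (i', j') ∈ ra ++ (qb ++ new)) hq
      · have hmd : pvMget d i' j' ≠ -1 := by
          rw [h3 i' j' hb, if_neg hin] at hm
          exact hm
        by_cases hxy' : (i', j') = (x, y)
        · have hi' : i' = x := congrArg Prod.fst hxy'
          have hj' : j' = y := congrArg Prod.snd hxy'
          subst hi' hj'
          exact h6 dd hdd hbx
        · have hnotq : (i', j') ∉ ((x, y) :: ra) ++ qb := by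
            intro hq'
            rcases (by simpa using hq' : (i' = x ∧ j' = y) ∨ (i', j') ∈ ra ∨ (i', j') ∈ qb)
              with ⟨h1, h2⟩ | h | h
            · exact hxy' (by rw [h1, h2])
            · exact hq (by simp [h])
            · exact hq (by simp [h])
          have := hcl i' j' hb hmd hnotq dd hdd hbx
          exact hmono _ _ hbx this
  rw [List.cons_append]
  have hstep := pvBfsLoop_cons n m f x y (ra ++ qb) d
  rw [hstep, ← hF]
  have hq1 : F.1 = ra ++ (qb ++ new) := by rw [h1, List.append_assoc]
  rw [hq1]
  apply ih k ra (qb ++ new) F.2 hinv' ?_ i j hij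
  have hlen : (ra ++ (qb ++ new)).length = ra.length + (qb.length + new.length) := by
    simp [List.length_append]
  have hlen0 : (((x, y) :: ra) ++ qb).length = ra.length + qb.length + 1 := by
    simp [List.length_append]
  omega

lemma pvBfs_main (n m : Int) (S : List (Int × Int))
    (hS : S ≠ []) (hbox : ∀ t ∈ S, pvInBox n m t.1 t.2) :
    ∀ fuel (k : Int) (qa qb : List (Int × Int)) (d : List (List Int)),
      pvInv n m S k qa qb d →
      2 * pvCnt d + (qa ++ qb).length ≤ fuel →
      ∀ i j, pvInBox n m i j →
        pvMget (pvBfsLoop n m [-1, -1, -1, 0, 0, 1, 1, 1] [-1, 0, 1, -1, 1, -1, 0, 1] fuel (qa ++ qb) d) i j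
          = pvDmin S i j := by
  intro fuel
  induction fuel with
  | zero =>
    intro k qa qb d hinv hμ i j hij
    have hql : (qa ++ qb).length = 0 := by omega
    have hqe : qa ++ qb = [] := List.length_eq_zero_iff.mp hql
    rw [hqe, pvBfsLoop_nil]
    obtain ⟨hsh, hk, hqa, hqb, hnd, hmk, hcor, hfr, hcl⟩ := hinv
    have hall := pvClosed_all_marked n m S k d hS hbox hk hfr (by
      intro i' j' hij' hm' dd hdd hbx
      exact hcl i' j' hij' hm' (by rw [hqe]; exact List.not_mem_nil) dd hdd hbx)
    exact hcor i j hij (hall i j hij)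
  | succ f ih =>
    intro k qa qb d hinv hμ i j hij
    -- first: if the k-block is empty, shift the frontier to k+1
    match qa, hinv, hμ with
    | [], hinv, hμ =>
      match qb, hinv, hμ with
      | [], hinv, hμ => 
        simp only [List.append_nil, pvBfsLoop_nil]
        obtain ⟨hsh, hk, hqa, hqb, hnd, hmk, hcor, hfr, hcl⟩ := hinv
        have hall := pvClosed_all_marked n m S k d hS hbox hk hfr (by
          intro i' j' hij' hm' dd hdd hbx
          exact hcl i' j' hij' hm' (by simp) dd hdd hbx)
        exact hcor i j hij (hall i j hij)
      | (x, y) :: qb', hinv, hμ =>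
        have hinv' := pvInv_norm n m S k ((x, y) :: qb') d hS hbox hinv
        have := pvBfs_pop n m S hS f
          (fun k qa qb d hinv hm i j hij => ih k qa qb d hinv hm i j hij)
          (k + 1) x y qb' [] d (by simpa using hinv') (by simpa using hμ) i j hij
        simpa using this
    | (x, y) :: ra, hinv, hμ =>
      exact pvBfs_pop n m S hS f
        (fun k qa qb d hinv hm i j hij => ih k qa qb d hinv hm i j hij)
        k x y ra qb d hinv hμ i j hij

-- ---- the shark list ----
lemma pvSharks_eq (grid : List (List Int)) (n m : Int) :
    ((PySem.List.pyRange 0 n 1).foldl (fun acc i =>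
      (PySem.List.pyRange 0 m 1).foldl (fun acc j =>
        if pvGridAt grid i j = 1 then acc ++ [(i, j)] else acc) acc) []) =
    (PySem.List.pyRange 0 n 1).flatMap (fun i =>
      ((PySem.List.pyRange 0 m 1).filter (fun j => pvGridAt grid i j == 1)).map (fun j => (i, j))) := by
  have hinner : ∀ (i : Int) (acc : List (Int × Int)),
      (PySem.List.pyRange 0 m 1).foldl (fun acc j =>
        if pvGridAt grid i j = 1 then acc ++ [(i, j)] else acc) acc
      = acc ++ ((PySem.List.pyRange 0 m 1).filter (fun j => pvGridAt grid i j == 1)).map (fun j => (i, j)) := by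
    intro i acc
    rw [← PySem.List.foldl_append_if (fun j => pvGridAt grid i j == 1) (fun j => (i, j))]
    apply PySem.List.foldl_congr_mem
    intro acc j _
    simp only [beq_iff_eq]
  calc _ = (PySem.List.pyRange 0 n 1).foldl (fun acc i =>
        acc ++ ((PySem.List.pyRange 0 m 1).filter (fun j => pvGridAt grid i j == 1)).map (fun j => (i, j))) [] := by
        apply PySem.List.foldl_congr_mem
        intro acc i _
        exact hinner i acc
    _ = _ := by
        rw [PySem.List.foldl_append_eq_flatMap]
        rfl

lemma pvSharks_box (grid : List (List Int)) (n m : Int) (c : Int × Int)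
    (hc : c ∈ (PySem.List.pyRange 0 n 1).flatMap (fun i =>
      ((PySem.List.pyRange 0 m 1).filter (fun j => pvGridAt grid i j == 1)).map (fun j => (i, j)))) :
    pvInBox n m c.1 c.2 := by
  simp only [List.mem_flatMap, List.mem_map, List.mem_filter, PySem.List.mem_pyRange_one] at hc
  obtain ⟨i, ⟨hi1, hi2⟩, j, ⟨⟨hj1, hj2⟩, _⟩, rfl⟩ := hc
  exact ⟨hi1, hi2, hj1, hj2⟩

lemma pvSharks_nodup (grid : List (List Int)) (n m : Int) :
    ((PySem.List.pyRange 0 n 1).flatMap (fun i =>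
      ((PySem.List.pyRange 0 m 1).filter (fun j => pvGridAt grid i j == 1)).map (fun j => (i, j)))).Nodup := by
  rw [List.nodup_flatMap]
  constructor
  · intro i _
    apply List.Nodup.map
    · intro a b hab; simpa using hab
    · exact (PySem.List.nodup_pyRange_one 0 m).filter _
  · apply List.Pairwise.imp ?_ (PySem.List.pairwise_lt_pyRange_one 0 n)
    intro a b hab c hca hcb
    simp only [List.mem_map] at hca hcb
    obtain ⟨ja, _, rfl⟩ := hca
    obtain ⟨jb, _, h⟩ := hcb
    have : b = a := (Prod.mk.injEq .. ▸ h).1.symm ▸ rfl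
    omega

-- ---- initialisation ----
lemma pvInit_spec (n m : Int) (l : List (Int × Int)) (hbox : ∀ c ∈ l, pvInBox n m c.1 c.2) :
    ∀ (d : List (List Int)) (q : List (Int × Int)), pvShape n m d →
    (l.foldl (fun st s => (pvMset st.1 s.1 s.2 0, st.2 ++ [s])) (d, q)).2 = q ++ l ∧
    pvShape n m (l.foldl (fun st s => (pvMset st.1 s.1 s.2 0, st.2 ++ [s])) (d, q)).1 ∧
    (∀ i j, pvInBox n m i j →
      pvMget (l.foldl (fun st s => (pvMset st.1 s.1 s.2 0, st.2 ++ [s])) (d, q)).1 i j =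
        if (i, j) ∈ l then 0 else pvMget d i j) := by
  induction l with
  | nil => intro d q hs; simp [hs]
  | cons s l ih =>
    intro d q hs
    have hsbox := hbox s List.mem_cons_self
    have hstep := ih (fun c hc => hbox c (List.mem_cons_of_mem _ hc))
      (pvMset d s.1 s.2 0) (q ++ [s]) (pvShape_mset n m d s.1 s.2 0 hs)
    obtain ⟨hq, hsh, hget⟩ := hstep
    simp only [List.foldl_cons]
    refine ⟨?_, hsh, ?_⟩
    · simpa using hq
    · intro i j hij
      rw [hget i j hij]
      by_cases hmem : (i, j) = s
      · subst hmem
        rw [if_pos List.mem_cons_self]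
        split
        · rfl
        · exact pvMget_mset_self n m d i j 0 hs hij
      · rw [pvMget_mset_ne d s.1 s.2 i j 0 hsbox.1 hsbox.2.2.1 hij.1 hij.2.2.1
          (by simpa [Prod.ext_iff] using hmem)]
        by_cases h2 : (i, j) ∈ l
        · simp [h2]
        · simp [h2, hmem]

-- ---- final maximum loops ----
lemma pvIfMax (a b : Int) : (if a < b then b else a) = max a b := by
  rw [max_def]; split <;> split <;> omega

lemma pvFoldRow_zero (P : Int → Prop) [DecidablePred P] (f : Int → Int) (l : List Int)
    (hf : ∀ j ∈ l, f j = -1) :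
    ∀ acc : Int, 0 ≤ acc → l.foldl (fun a j => if P j then max a (f j) else a) acc = acc := by
  induction l with
  | nil => intro acc _; rfl
  | cons x l ih =>
    intro acc hacc
    simp only [List.foldl_cons]
    have hx := hf x List.mem_cons_self
    have ih' := ih (fun j hj => hf j (List.mem_cons_of_mem _ hj))
    split
    · rw [hx, max_eq_left (by omega)]
      exact ih' acc hacc
    · exact ih' acc hacc

lemma pvFinal_zero (grid : List (List Int)) (n m : Int) (d : List (List Int))
    (hd : ∀ i j, pvInBox n m i j → pvMget d i j = -1) :
    ((PySem.List.pyRange 0 n 1).foldl (fun acc i =>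
      (PySem.List.pyRange 0 m 1).foldl (fun acc j =>
        if pvGridAt grid i j = 0 then max acc (pvMget d i j) else acc) acc) 0) = 0 := by
  have houter : ∀ (li : List Int), (∀ i ∈ li, 0 ≤ i ∧ i < n) →
      ∀ acc : Int, 0 ≤ acc → li.foldl (fun acc i =>
        (PySem.List.pyRange 0 m 1).foldl (fun acc j =>
          if pvGridAt grid i j = 0 then max acc (pvMget d i j) else acc) acc) acc = acc := by
    intro li
    induction li with
    | nil => intro _ acc _; rfl
    | cons x li ih =>
      intro hli acc hacc
      simp only [List.foldl_cons]
      rw [pvFoldRow_zero (fun j => pvGridAt grid x j = 0) (fun j => pvMget d x j)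
        (PySem.List.pyRange 0 m 1) ?_ acc hacc]
      · exact ih (fun i hi => hli i (List.mem_cons_of_mem _ hi)) acc hacc
      · intro j hj
        rw [PySem.List.mem_pyRange_one] at hj
        have hx := hli x List.mem_cons_self
        exact hd x j ⟨hx.1, hx.2, hj.1, hj.2⟩
  apply houter
  · intro i hi; rw [PySem.List.mem_pyRange_one] at hi; exact hi
  · exact le_refl 0

theorem find_max_safe_distance_spec : Claim_equal_find_max_safe_distance := by
  intro grid n m _hDom _hPre
  unfold Spec_find_max_safe_distance find_max_safe_distance find_max_safe_distance_alt
  rw [pvSharks_eq grid n m]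
  set S := (PySem.List.pyRange 0 n 1).flatMap (fun i =>
    ((PySem.List.pyRange 0 m 1).filter (fun j => pvGridAt grid i j == 1)).map (fun j => (i, j)))
    with hSL
  cases hc : S with
  | nil =>
    simp only [List.foldl_nil]
    rw [pvBfsLoop_nil]
    refine pvFinal_zero grid n m _ (fun i j _ => pvMget_rep _ m.toNat i j ?_)
    intro r hr
    obtain ⟨_, _, rfl⟩ := List.mem_map.mp hr
    rfl
  | cons s0 ss =>
    rw [hSL] at hc
    have hbox : ∀ t ∈ s0 :: ss, pvInBox n m t.1 t.2 := by
      intro t ht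
      exact pvSharks_box grid n m t (hc ▸ ht)
    have hnd : (s0 :: ss).Nodup := hc ▸ pvSharks_nodup grid n m
    have hd0rep : ∀ r ∈ (PySem.List.pyRange 0 n 1).map (fun _ => List.replicate m.toNat (-1)),
        r = List.replicate m.toNat (-1) := by
      intro r hr
      obtain ⟨_, _, rfl⟩ := List.mem_map.mp hr
      rfl
    have hd0get : ∀ i j : Int,
        pvMget ((PySem.List.pyRange 0 n 1).map (fun _ => List.replicate m.toNat (-1))) i j = -1 :=
      fun i j => pvMget_rep _ m.toNat i j hd0rep
    have hsh0 : pvShape n m ((PySem.List.pyRange 0 n 1).map (fun _ => List.replicate m.toNat (-1))) := by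
      refine ⟨by simp [PySem.List.length_pyRange_one], ?_⟩
      intro r hr
      rw [hd0rep r hr]
      simp
    obtain ⟨hq2, hsh1, hget1⟩ := pvInit_spec n m (s0 :: ss) hbox
      ((PySem.List.pyRange 0 n 1).map (fun _ => List.replicate m.toNat (-1))) [] hsh0
    set dI := (List.foldl (fun st s => (pvMset st.1 s.1 s.2 0, st.2 ++ [s]))
      ((PySem.List.pyRange 0 n 1).map (fun _ => List.replicate m.toNat (-1)), []) (s0 :: ss)).1 with hdI
    have hinv0 : pvInv n m (s0 :: ss) 0 (s0 :: ss) [] dI := by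
      refine ⟨hsh1, le_refl 0, ?_, by simp, by simpa using hnd, ?_, ?_, ?_, ?_⟩
      · intro c hcm
        refine ⟨hbox c hcm, pvDmin_zero_of_mem (s0 :: ss) c.1 c.2 ?_⟩
        simpa using hcm
      · intro c hcm
        rw [List.append_nil] at hcm
        refine ⟨hbox c hcm, ?_⟩
        rw [hget1 c.1 c.2 (hbox c hcm), if_pos (by simpa using hcm)]
        omega
      · intro i j hij hm
        rw [hget1 i j hij] at hm ⊢
        split at hm
        · rw [if_pos (by assumption)]
          exact (pvDmin_zero_of_mem (s0 :: ss) i j (by assumption)).symm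
        · rw [hd0get] at hm
          exact absurd rfl hm
      · intro i j hij hle
        have h0 : pvDmin (s0 :: ss) i j = 0 := by
          have := pvDmin_nonneg (s0 :: ss) i j (by simp)
          omega
        have hmem := pvDmin_mem_of_zero (s0 :: ss) i j (by simp) h0
        rw [hget1 i j hij, if_pos hmem]
        omega
      · intro i j hij hm hq dd hdd hbx
        exfalso
        apply hq
        rw [hget1 i j hij] at hm
        split at hm
        · simpa using (by assumption : (i, j) ∈ s0 :: ss)
        · rw [hd0get] at hm
          exact absurd rfl hm
    simp only [hq2, List.nil_append]
    have hμ : 2 * pvCnt dI + ((s0 :: ss) ++ []).length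
        ≤ 2 * (n.toNat * m.toNat) + (s0 :: ss).length + 1 := by
      have := pvCnt_le n m dI hsh1
      simp only [List.append_nil]
      omega
    have main := pvBfs_main n m (s0 :: ss) (by simp) hbox
      (2 * (n.toNat * m.toNat) + (s0 :: ss).length + 1) 0 (s0 :: ss) [] dI hinv0 hμ
    rw [List.append_nil] at main
    apply PySem.List.foldl_congr_mem
    intro acc i hi
    apply PySem.List.foldl_congr_mem
    intro acc2 jx hj
    have hbox' : pvInBox n m i jx := by
      rw [PySem.List.mem_pyRange_one] at hi hj
      exact ⟨hi.1, hi.2, hj.1, hj.2⟩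
    by_cases hg : pvGridAt grid i jx = 0
    · rw [if_pos hg, if_pos hg]
      simp only [pvIfMax]
      rw [main i jx hbox']
      rfl
    · rw [if_neg hg, if_neg hg]
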